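-- pv_equiv track=rewrite | github.com/matrimonysanskaar/Astrologymatch | services/numerology_service.py | reduce_to_single_digit
-- ===== SOURCE A (Python) =====
-- MASTER_NUMBERS = {11, 22, 33}
--
-- def reduce_to_single_digit(number: int, include_master: bool = True) -> int:
--     """
--     Reduce a number to a single digit using the Pythagorean method.
--     Master numbers (11, 22, 33) are preserved if include_master is True.
--     """
--     if number <= 0:
--         return 0
--
--     # If it's a master number and we want to keep it
--     if include_master and number in MASTER_NUMBERS:
--         return number
--
--     while number > 9 and number not in MASTER_NUMBERS:
--         number = sum(int(digit) for digit in str(number))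
--
--     return number
-- ===== SOURCE B (Python) =====
-- def reduce_to_single_digit(number: int, include_master: bool = True) -> int:
--     # Recursive digital-root using pure arithmetic (divmod) instead of
--     # string conversion; the master check applies on every step, as in A.
--     if number <= 0:
--         return 0
--     if number <= 9 or number in (11, 22, 33):
--         return number
--     s, n = 0, number
--     while n:
--         n, d = divmod(n, 10)
--         s += d
--     return reduce_to_single_digit(s, include_master)
-- ===== Notes on version B (the rewrite author's own statement) =====
-- stated objective: alternative
-- what changed: Replaces A's string-conversion digit sum inside a while loop by a recursive digital-root whose digit sum is computed arithmetically with divmod, with one base case (<=9 or master) subsuming A's separate include_master branch and loop condition.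
import Mathlib
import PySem

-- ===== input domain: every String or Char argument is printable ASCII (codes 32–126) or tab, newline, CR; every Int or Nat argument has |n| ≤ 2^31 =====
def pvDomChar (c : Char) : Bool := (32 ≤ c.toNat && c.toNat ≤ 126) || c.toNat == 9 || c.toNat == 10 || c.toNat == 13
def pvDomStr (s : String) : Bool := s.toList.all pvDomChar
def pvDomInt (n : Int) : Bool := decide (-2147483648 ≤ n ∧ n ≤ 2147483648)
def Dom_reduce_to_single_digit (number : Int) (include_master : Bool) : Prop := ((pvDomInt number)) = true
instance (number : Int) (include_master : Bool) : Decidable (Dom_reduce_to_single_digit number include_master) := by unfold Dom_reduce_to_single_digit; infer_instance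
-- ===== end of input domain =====

-- B: replaces A's string-conversion digit sum inside a while loop by a recursive
-- digital-root whose digit sum is computed arithmetically with divmod.


-- ===== PORT A =====
-- MASTER_NUMBERS = {11, 22, 33}  (a Python set of distinct literals)
def MASTER_NUMBERS : List Int := [11, 22, 33]

-- sum(int(digit) for digit in str(number)) : int(c) for a single char c;
-- the .getD 0 default is unreachable on the digit characters produced by str(n) for n > 9.
def pyCharVal (c : Char) : Int := (PySem.Int.ofChars? [c]).getD 0

def pyDigitSum (n : Int) : Int := ((PySem.Int.toChars n).map pyCharVal).sum

-- digit-sum bound used only to justify termination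
theorem digitsSum_le (n : Nat) : (Nat.digits 10 n).sum ≤ n := by
  induction n using Nat.strong_induction_on with
  | _ n ih =>
    rcases Nat.eq_zero_or_pos n with h0 | hp
    · simp [h0]
    · rw [Nat.digits_def' (by norm_num : 1 < 10) hp, List.sum_cons]
      have h1 := ih (n / 10) (Nat.div_lt_self hp (by norm_num))
      have h2 := Nat.div_add_mod n 10
      omega

theorem pyCharVal_digitChar (d : Nat) (hd : d < 10) :
    pyCharVal (Nat.digitChar d) = (d : Int) := by
  interval_cases d <;> decide

theorem toDigitsCore_sum (f : Nat) : ∀ (n : Nat) (l : List Char), n < f →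
    ((Nat.toDigitsCore 10 f n l).map pyCharVal).sum
      = ((Nat.digits 10 n).sum : Int) + ((l.map pyCharVal).sum) := by
  induction f with
  | zero => intro n l h; omega
  | succ f ih =>
    intro n l h
    rw [Nat.toDigitsCore]
    by_cases h10 : n / 10 = 0
    · rcases Nat.eq_zero_or_pos n with h0 | hp
      · subst h0
        simp [pyCharVal_digitChar 0 (by omega)]
      · rw [if_pos h10, Nat.digits_def' (by norm_num : 1 < 10) hp, h10]
        simp [pyCharVal_digitChar (n % 10) (by omega)]
    · have hdiv : n / 10 < f := by
        have := Nat.div_lt_self (by omega : 0 < n) (by omega : 1 < 10)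
        omega
      rw [if_neg h10, ih (n / 10) _ hdiv,
        Nat.digits_def' (by norm_num : 1 < 10) (by omega : 0 < n), List.sum_cons]
      simp only [List.map_cons, List.sum_cons, pyCharVal_digitChar (n % 10) (by omega)]
      push_cast
      ring

theorem pyDigitSum_pos_eq (n : Int) (hn : 0 < n) :
    pyDigitSum n = ((Nat.digits 10 n.toNat).sum : Int) := by
  unfold pyDigitSum PySem.Int.toChars
  rw [if_neg (by omega), Nat.toDigits]
  rw [toDigitsCore_sum (n.toNat + 1) n.toNat [] (by omega)]
  simp

-- for n > 9 the digit sum strictly decreases (termination of A's while loop)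
theorem pyDigitSum_lt (n : Int) (hn : 9 < n) : (pyDigitSum n).toNat < n.toNat := by
  rw [pyDigitSum_pos_eq n (by omega)]
  rw [Nat.digits_def' (by norm_num : 1 < 10) (by omega : 0 < n.toNat), List.sum_cons]
  have h1 := digitsSum_le (n.toNat / 10)
  have h2 := Nat.div_add_mod n.toNat 10
  have h3 := Nat.div_lt_self (by omega : 0 < n.toNat) (by omega : 1 < 10)
  omega

-- while number > 9 and number not in MASTER_NUMBERS: number = sum(int(d) for d in str(number))
def whileLoopA (number : Int) : Int :=
  if h : 9 < number ∧ ¬ MASTER_NUMBERS.contains number then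
    whileLoopA (pyDigitSum number)
  else number
termination_by number.toNat
decreasing_by exact pyDigitSum_lt number h.1

def reduce_to_single_digit (number : Int) (include_master : Bool) : Int :=
  if number ≤ 0 then 0
  else if include_master && MASTER_NUMBERS.contains number then number
  else whileLoopA number

-- ===== PORT B =====
-- `s, n = 0, number; while n: n, d = divmod(n, 10); s += d`
-- ported with a structural fuel counter (n.toNat + 1 strictly bounds the number of
-- iterations, since each one divides n by 10); the n ≤ 0 exit only makes the loop
-- total — B only calls it with n > 9
def digitSumBGo : Nat → Int → Int → Int
  | 0, s, _ => s
  | f + 1, s, n =>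
    if n ≤ 0 then s
    else digitSumBGo f (s + PySem.Int.mod n 10) (PySem.Int.floordiv n 10)

def digitSumB (s n : Int) : Int := digitSumBGo (n.toNat + 1) s n

-- termination of B's recursion: the digit sum of n > 9 is strictly smaller
theorem digitSumBGo_le (f : Nat) : ∀ (s n : Int), digitSumBGo f s n ≤ s + max n 0 := by
  induction f with
  | zero => intro s n; simp only [digitSumBGo]; omega
  | succ f ih =>
    intro s n
    rw [digitSumBGo]
    by_cases hn : n ≤ 0
    · rw [if_pos hn]; omega
    · rw [if_neg hn,
        PySem.Int.floordiv_eq_ediv_of_pos (by omega : (0:Int) < 10),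
        PySem.Int.mod_eq_emod_of_pos (by omega : (0:Int) < 10)]
      have h1 := ih (s + n % 10) (n / 10)
      omega

theorem digitSumB_toNat_lt (n : Int) (hn : 9 < n) : (digitSumB 0 n).toNat < n.toNat := by
  unfold digitSumB
  obtain ⟨k, hk⟩ : ∃ k, n.toNat + 1 = k + 1 := ⟨n.toNat, rfl⟩
  rw [hk, digitSumBGo, if_neg (by omega),
    PySem.Int.floordiv_eq_ediv_of_pos (by omega : (0:Int) < 10),
    PySem.Int.mod_eq_emod_of_pos (by omega : (0:Int) < 10)]
  have h1 := digitSumBGo_le k (0 + n % 10) (n / 10)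
  omega

def reduce_to_single_digit_alt (number : Int) (include_master : Bool) : Int :=
  if number ≤ 0 then 0
  else if number ≤ 9 ∨ number = 11 ∨ number = 22 ∨ number = 33 then number
  else reduce_to_single_digit_alt (digitSumB 0 number) include_master
termination_by number.toNat
decreasing_by exact digitSumB_toNat_lt number (by omega)

-- ===== PRECONDITION & SPEC =====
def Spec_reduce_to_single_digit (number : Int) (include_master : Bool) (out : Int) : Prop := out = reduce_to_single_digit_alt number include_master
instance (number : Int) (include_master : Bool) (out : Int) : Decidable (Spec_reduce_to_single_digit number include_master out) := by unfold Spec_reduce_to_single_digit; infer_instance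

-- ===== CLAIM (what is proved, stated in full; the proofs are below) =====
def Claim_equal_reduce_to_single_digit : Prop := ∀ (number : Int) (include_master : Bool), Dom_reduce_to_single_digit number include_master → Spec_reduce_to_single_digit number include_master (reduce_to_single_digit number include_master)

-- ===== LEMMAS AND PROOFS =====
theorem one_le_digitsSum (n : Nat) (hn : 1 ≤ n) : 1 ≤ (Nat.digits 10 n).sum := by
  induction n using Nat.strong_induction_on with
  | _ n ih =>
    rw [Nat.digits_def' (by norm_num : 1 < 10) (by omega : 0 < n), List.sum_cons]
    by_cases h10 : n / 10 = 0
    · have : n % 10 = n := by omega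
      omega
    · have h1 := ih (n / 10) (Nat.div_lt_self (by omega) (by norm_num)) (by omega)
      omega

theorem digitSumBGo_eq_digits (f : Nat) : ∀ (s n : Int), 0 ≤ n → n.toNat < 10 ^ f →
    digitSumBGo f s n = s + ((Nat.digits 10 n.toNat).sum : Int) := by
  induction f with
  | zero =>
    intro s n h0 hf
    have : n = 0 := by simp at hf; omega
    subst this
    simp [digitSumBGo]
  | succ f ih =>
    intro s n h0 hf
    rw [digitSumBGo]
    by_cases hn : n ≤ 0
    · have : n = 0 := by omega
      subst this
      simp
    · rw [if_neg hn,
        PySem.Int.floordiv_eq_ediv_of_pos (by omega : (0:Int) < 10),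
        PySem.Int.mod_eq_emod_of_pos (by omega : (0:Int) < 10)]
      have hdiv : (n / 10).toNat < 10 ^ f := by
        have h1 : (n / 10).toNat = n.toNat / 10 := by omega
        rw [h1]
        have := Nat.div_lt_iff_lt_mul (by norm_num : 0 < 10) (x := n.toNat) (y := 10 ^ f)
        rw [pow_succ] at hf
        omega
      rw [ih (s + n % 10) (n / 10) (by omega) hdiv,
        Nat.digits_def' (by norm_num : 1 < 10) (by omega : 0 < n.toNat), List.sum_cons]
      have h1 : (n / 10).toNat = n.toNat / 10 := by omega
      have h2 : n % 10 = ((n.toNat % 10 : Nat) : Int) := by omega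
      rw [h1, h2]
      push_cast
      ring

theorem digitSumB_eq_digits (s n : Int) (h0 : 0 ≤ n) :
    digitSumB s n = s + ((Nat.digits 10 n.toNat).sum : Int) := by
  unfold digitSumB
  exact digitSumBGo_eq_digits (n.toNat + 1) s n h0
    (lt_of_lt_of_le (Nat.lt_pow_self (by norm_num)) (Nat.pow_le_pow_right (by norm_num) (by omega)))

theorem pyDigitSum_eq_B (n : Int) (hn : 0 < n) : pyDigitSum n = digitSumB 0 n := by
  rw [pyDigitSum_pos_eq n hn, digitSumB_eq_digits 0 n (by omega), zero_add]

theorem master_mem_iff (n : Int) :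
    MASTER_NUMBERS.contains n = true ↔ (n = 11 ∨ n = 22 ∨ n = 33) := by
  simp [MASTER_NUMBERS]

theorem loop_eq_alt (number : Int) (include_master : Bool) (hpos : 0 < number) :
    whileLoopA number = reduce_to_single_digit_alt number include_master := by
  induction number using whileLoopA.induct with
  | case1 n h ih =>
    have hds : 0 < pyDigitSum n := by
      rw [pyDigitSum_pos_eq n (by omega)]
      have := one_le_digitsSum n.toNat (by omega)
      omega
    rw [whileLoopA, dif_pos h, reduce_to_single_digit_alt, if_neg (by omega),
      if_neg (by
        have hm := h.2
        rw [master_mem_iff] at hm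
        omega),
      ← pyDigitSum_eq_B n (by omega)]
    exact ih hds
  | case2 n h =>
    rw [whileLoopA, dif_neg h, reduce_to_single_digit_alt, if_neg (by omega), if_pos]
    rcases not_and_or.mp h with h9 | hm
    · left; omega
    · right
      rw [not_not] at hm
      exact (master_mem_iff n).mp hm

-- ===== VERDICT (by name: the statement is the Claim_ definition above) =====
theorem reduce_to_single_digit_spec : Claim_equal_reduce_to_single_digit := by
  intro number include_master _hdom
  unfold Spec_reduce_to_single_digit
  by_cases hle : number ≤ 0
  · rw [reduce_to_single_digit, if_pos hle, reduce_to_single_digit_alt, if_pos hle]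
  · rw [reduce_to_single_digit, if_neg hle]
    by_cases hm : (include_master && MASTER_NUMBERS.contains number) = true
    · rw [if_pos hm, reduce_to_single_digit_alt, if_neg hle, if_pos]
      right
      exact (master_mem_iff number).mp ((Bool.and_eq_true _ _).mp hm).2
    · rw [if_neg hm]
      exact loop_eq_alt number include_master (by omega)
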